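-- pv_equiv track=rewrite | github.com/jmin123/coding-problem-repo | expressible_binary_tree.py | solution
-- ===== SOURCE A (Python) =====
-- def solution(numbers):
--     def is_complete_binary_tree(s):
--         if len(s) == 1:
--             return s == '1'
--
--         mid = len(s) // 2
--         left_subtree = s[:mid]
--         right_subtree = s[mid+1:]
--
--         if s[mid] == '0':
--             return all(bit == '0' for bit in left_subtree) and all(bit == '0' for bit in right_subtree)
--
--         return is_complete_binary_tree(left_subtree) and is_complete_binary_tree(right_subtree)
--
--     def check_binary_tree(n):
--         s = bin(n)[2:]
--         N = len(s)
--         target_length = 2**((N-1).bit_length()) - 1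
--         s = '0' * (target_length - N) + s
--
--         return is_complete_binary_tree(s)
--
--     return [1 if check_binary_tree(n) else 0 for n in numbers]
-- ===== SOURCE B (Python) =====
-- def solution(numbers):
--     result = []
--     for n in numbers:
--         s = bin(n)[2:]
--         N = len(s)
--         target_length = 2 ** ((N - 1).bit_length()) - 1
--         if target_length > N:
--             s = '0' * (target_length - N) + s
--         ok = True
--         stack = [(0, len(s), False)]
--         while ok and stack:
--             lo, hi, forced = stack.pop()
--             if forced:
--                 # the whole region must consist of '0's; no recursion needed
--                 ok = s.count('0', lo, hi) == hi - lo
--             elif hi - lo == 1: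
--                 ok = s[lo] == '1'
--             elif hi <= lo:
--                 ok = False  # malformed (non 2^d - 1) layout: this node is missing
--             else:
--                 mid = (lo + hi) // 2
--                 zero = s[mid] == '0'
--                 stack.append((mid + 1, hi, zero))
--                 stack.append((lo, mid, zero))
--         result.append(1 if ok else 0)
--     return result
-- ===== Notes on version B (the rewrite author's own statement) =====
-- stated objective: alternative
-- what changed: Replaced A's slicing recursion (which copies substrings at every level) by an iterative explicit-stack pass over (lo,hi,forced) index intervals into the one padded string, where a '0'-rooted subtree is checked by a single flat count of zeros instead of recursing; no substring is ever copied.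
import Mathlib
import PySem

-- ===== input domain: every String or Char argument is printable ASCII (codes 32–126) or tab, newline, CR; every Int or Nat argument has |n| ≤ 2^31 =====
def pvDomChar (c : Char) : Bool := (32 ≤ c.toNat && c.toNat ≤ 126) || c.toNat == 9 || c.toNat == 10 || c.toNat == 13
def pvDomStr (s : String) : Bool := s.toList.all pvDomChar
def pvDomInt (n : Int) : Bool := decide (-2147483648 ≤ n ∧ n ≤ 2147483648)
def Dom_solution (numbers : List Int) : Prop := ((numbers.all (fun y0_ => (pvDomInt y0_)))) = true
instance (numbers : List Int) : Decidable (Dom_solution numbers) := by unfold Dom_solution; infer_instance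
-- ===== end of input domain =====

-- B replaces A's slicing recursion by an iterative pass over an explicit stack of
-- (lo, hi, forced) index intervals, with a flat zero-count for '0'-rooted subtrees
-- (objective: alternative; return values proved equal under Pre_, no argument is mutated).

-- ===== PORT A =====
-- shared preprocessing, identical lines in A's and B's source:
--   s = bin(n)[2:];  pad to 2**((N-1).bit_length()) - 1
-- bin(n)[2:] = (PySem.Int.toBinChars0b n).drop 2 (xs[2:] = drop 2, PySem.List.slice_from);
-- '0' * (target_length - N) is '' for a negative count, matching Int.toNat's clamp to 0.
def binPadded (n : Int) : List Char :=
  let s := (PySem.Int.toBinChars0b n).drop 2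
  let N := s.length
  let target : Int := 2 ^ (PySem.Int.bitLength ((N : Int) - 1)) - 1
  List.replicate (target - (N : Int)).toNat '0' ++ s

-- A's is_complete_binary_tree on the string as List Char; s[mid] on an out-of-range mid is
-- Python's IndexError (A raises there; such inputs are outside Pre_), here the none branch.
def isCompleteA (s : List Char) : Bool :=
  if s.length == 1 then s == ['1']
  else
    let mid := s.length / 2
    match h : s[mid]? with
    | none => false
    | some c =>
      if c == '0' then (s.take mid).all (· == '0') && (s.drop (mid + 1)).all (· == '0')
      else isCompleteA (s.take mid) && isCompleteA (s.drop (mid + 1))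
termination_by s.length
decreasing_by
  all_goals
    cases s with
    | nil => simp at h
    | cons a t => simp; all_goals omega

def solution (numbers : List Int) : List Int :=
  numbers.map (fun n => if isCompleteA (binPadded n) then 1 else 0)

-- ===== PORT B =====
-- Source B's while loop over the explicit stack; `while ok and stack` = stop (false) as soon as
-- a check fails.  s.count('0', lo, hi) counts '0' in s[lo:hi] = (s.drop lo).take (hi - lo)
-- (Python's clamped slice, PySem.List.slice); the stack is a list with its head as the top.
def loopB (s : List Char) : List (Nat × Nat × Bool) → Bool
  | [] => true
  | (lo, hi, forced) :: rest =>
    if forced then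
      if ((s.drop lo).take (hi - lo)).count '0' == hi - lo then loopB s rest else false
    else if hi - lo == 1 then
      if s[lo]? == some '1' then loopB s rest else false
    else if hi ≤ lo then false
    else
      let mid := (lo + hi) / 2
      let zero := s[mid]? == some '0'
      loopB s ((lo, mid, zero) :: (mid + 1, hi, zero) :: rest)
termination_by st => st.foldr (fun e acc => 2 * (e.2.1 - e.1) + 1 + acc) 0
decreasing_by
  all_goals simp [List.foldr] <;> omega

def solution_alt (numbers : List Int) : List Int :=
  numbers.map (fun n =>
    let s := binPadded n
    if loopB s [(0, s.length, false)] then 1 else 0)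

-- ===== PRECONDITION & SPEC =====
-- Pre_ excludes exactly the inputs on which the Python A raises IndexError: positive n whose
-- binary length is a power of two 2^k (2..32 inside Dom, hence k ≤ 5) with a 1-bit at every
-- string position 2^0 .. 2^(k-1): A's padding formula leaves such strings at an even length
-- and its recursion then reaches an empty right subtree and indexes into it.
def Pre_solution (numbers : List Int) : Prop :=
  ∀ n ∈ numbers, ¬ (2 ≤ n ∧ ∃ k ∈ Finset.Icc 1 5,
    PySem.Int.bitLength n = 2 ^ k ∧
    ∀ j < k, n.toNat.testBit (2 ^ k - 1 - 2 ^ j) = true)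
instance (numbers : List Int) : Decidable (Pre_solution numbers) := by
  unfold Pre_solution; infer_instance

def pvWitness_solution : List Int := [1, 7, -3, 42, 8]

def Spec_solution (numbers : List Int) (out : List Int) : Prop := out = solution_alt numbers
instance (numbers : List Int) (out : List Int) : Decidable (Spec_solution numbers out) := by unfold Spec_solution; infer_instance

-- ===== CLAIM (what is proved, stated in full; the proofs are below) =====
def Claim_equal_solution : Prop := ∀ (numbers : List Int), Dom_solution numbers → Pre_solution numbers → Spec_solution numbers (solution numbers)

-- ===== LEMMAS AND PROOFS =====

def seg (s : List Char) (lo hi : Nat) : List Char := (s.drop lo).take (hi - lo)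

theorem count_eq_length_iff_all (t : List Char) :
    (t.count '0' == t.length) = t.all (· == '0') := by
  induction t with
  | nil => rfl
  | cons c t ih =>
    have hc := List.count_le_length (l := t) (a := '0')
    by_cases h : c = '0'
    · subst h
      simp only [List.count_cons, List.all_cons, List.length_cons, ← ih, beq_self_eq_true,
        Bool.true_and]
      rw [Bool.eq_iff_iff]
      simp only [if_true, beq_iff_eq]
      omega
    · have hce : (c == '0') = false := by simp [h]
      simp only [List.count_cons, List.all_cons, List.length_cons, hce,
        Bool.false_and]
      rw [Bool.eq_iff_iff]
      simp only [Bool.false_eq_true, if_false, beq_iff_eq]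
      constructor
      · intro hcl; omega
      · intro hcl2; exact absurd hcl2 (by simp)

theorem loopB_forced (s : List Char) (lo hi : Nat) (rest : List (Nat × Nat × Bool))
    (hhi : hi ≤ s.length) :
    loopB s ((lo, hi, true) :: rest) = ((seg s lo hi).all (· == '0') && loopB s rest) := by
  have hlen : ((s.drop lo).take (hi - lo)).length = hi - lo := by simp; omega
  have key : (((s.drop lo).take (hi - lo)).count '0' == hi - lo) = (seg s lo hi).all (· == '0') := by
    rw [← count_eq_length_iff_all, seg, hlen]
  rw [loopB, key]
  cases h : (seg s lo hi).all (· == '0') <;> simp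

theorem seg_take (s : List Char) (lo hi m : Nat) (h : lo + m ≤ hi) :
    (seg s lo hi).take m = seg s lo (lo + m) := by
  simp only [seg, List.take_take]
  congr 1
  omega

theorem seg_drop (s : List Char) (lo hi m : Nat) :
    (seg s lo hi).drop m = seg s (lo + m) hi := by
  simp only [seg, List.drop_take, List.drop_drop]
  congr 1
  omega

theorem seg_length (s : List Char) (lo hi : Nat) (h : hi ≤ s.length) :
    (seg s lo hi).length = hi - lo := by
  simp [seg]; omega

theorem seg_getElem? (s : List Char) (lo hi m : Nat) (h : lo + m < hi) (h2 : hi ≤ s.length) :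
    (seg s lo hi)[m]? = s[lo + m]? := by
  simp only [seg, List.getElem?_take, List.getElem?_drop]
  rw [if_pos (by omega)]

theorem isCompleteA_nil : isCompleteA [] = false := by
  rw [isCompleteA]; rfl

theorem loopB_eval (s : List Char) :
    ∀ (d lo hi : Nat) (rest : List (Nat × Nat × Bool)), hi - lo ≤ d → hi ≤ s.length →
      loopB s ((lo, hi, false) :: rest) = (isCompleteA (seg s lo hi) && loopB s rest) := by
  intro d
  induction d with
  | zero =>
    intro lo hi rest hd hs
    have h2 : hi ≤ lo := by omega
    have e1 : (hi - lo == 1) = false := by simp only [beq_eq_false_iff_ne]; omega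
    have e2 : seg s lo hi = [] := by
      simp [seg, show hi - lo = 0 from by omega]
    rw [loopB]
    simp only [Bool.false_eq_true, if_false, e1, if_pos h2, e2, isCompleteA_nil,
      Bool.false_and]
  | succ d ih =>
    intro lo hi rest hd hs
    by_cases h2 : hi ≤ lo
    · have e1 : (hi - lo == 1) = false := by simp only [beq_eq_false_iff_ne]; omega
      have e2 : seg s lo hi = [] := by
        simp [seg, show hi - lo = 0 from by omega]
      rw [loopB]
      simp only [Bool.false_eq_true, if_false, e1, if_pos h2, e2, isCompleteA_nil,
        Bool.false_and]
    · by_cases h1 : hi - lo = 1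
      · -- leaf
        have hlo : lo < s.length := by omega
        have e1 : (hi - lo == 1) = true := by simp [h1]
        have eg : s[lo]? = some s[lo] := List.getElem?_eq_getElem hlo
        have e2 : seg s lo hi = [s[lo]] := by
          rw [seg, h1, List.drop_eq_getElem_cons hlo]
          rfl
        rw [loopB]
        simp only [Bool.false_eq_true, if_false, e1, if_true, eg, e2]
        rw [isCompleteA]
        simp only [List.length_cons, List.length_nil]
        cases hc : (s[lo] == '1') <;> simp_all
      · -- internal node
        have hlh : 2 ≤ hi - lo := by omega
        have hmlt : (lo + hi) / 2 < hi := by omega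
        have hmge : lo < (lo + hi) / 2 := by omega
        have hmid : lo + (hi - lo) / 2 = (lo + hi) / 2 := by omega
        have hms : (lo + hi) / 2 < s.length := by omega
        have e1 : (hi - lo == 1) = false := by simp only [beq_eq_false_iff_ne]; omega
        have eg : s[(lo + hi) / 2]? = some (s[(lo + hi) / 2]) :=
          List.getElem?_eq_getElem hms
        have egs : (seg s lo hi)[(hi - lo) / 2]? = some (s[(lo + hi) / 2]) := by
          rw [seg_getElem? s lo hi ((hi - lo) / 2) (by omega) hs, hmid, eg]
        have elen : (seg s lo hi).length = hi - lo := seg_length s lo hi hs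
        have etake : (seg s lo hi).take ((hi - lo) / 2) = seg s lo ((lo + hi) / 2) := by
          rw [seg_take s lo hi ((hi - lo) / 2) (by omega), hmid]
        have edrop : (seg s lo hi).drop ((hi - lo) / 2 + 1) = seg s ((lo + hi) / 2 + 1) hi := by
          rw [seg_drop s lo hi ((hi - lo) / 2 + 1), show lo + ((hi - lo) / 2 + 1) = (lo + hi) / 2 + 1 from by omega]
        rw [loopB]
        simp only [Bool.false_eq_true, if_false, e1, if_neg h2, eg, Option.some_beq_some]
        rw [isCompleteA]
        simp only [elen, e1, Bool.false_eq_true, if_false]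
        split
        · next hnone =>
            rw [elen, egs] at hnone
            exact absurd hnone (by simp)
        · next c hc =>
            rw [elen, egs] at hc
            injection hc with hc
            subst hc
            by_cases hz : s[(lo + hi) / 2] = '0'
            · simp only [hz, beq_self_eq_true, if_true, etake, edrop]
              rw [loopB_forced s lo ((lo + hi) / 2) _ (by omega),
                loopB_forced s ((lo + hi) / 2 + 1) hi _ (by omega)]
              rw [Bool.and_assoc]
            · have hzf : (s[(lo + hi) / 2] == '0') = false := by simp [hz]
              simp only [hzf, Bool.false_eq_true, if_false, etake, edrop]
              rw [ih lo ((lo + hi) / 2) _ (by omega) (by omega),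
                ih ((lo + hi) / 2 + 1) hi _ (by omega) (by omega)]
              rw [Bool.and_assoc]

theorem loopB_whole (s : List Char) :
    loopB s [(0, s.length, false)] = isCompleteA s := by
  have h := loopB_eval s s.length 0 s.length [] (by omega) (le_refl _)
  rw [h, show loopB s [] = true from by rw [loopB], Bool.and_true]
  simp [seg]

-- ===== VERDICT (by name: the statement is the Claim_ definition above) =====
theorem solution_spec : Claim_equal_solution := by
  intro numbers _ _
  unfold Spec_solution solution solution_alt
  simp only [List.map_inj_left]
  intro n _
  rw [loopB_whole]
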